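-- pv_equiv track=rewrite | github.com/abodefy43-spec/qeu-bundling-system | src/legacy/qeu_bundling/core/final_recommendations.py | _coprime_rotation_step
-- ===== SOURCE A (Python) =====
-- def _coprime_rotation_step(size: int) -> int:
--     candidate = 2
--     pool_size = max(1, int(size))
--     while candidate < pool_size:
--         left = candidate
--         right = pool_size
--         while right:
--             left, right = right, left % right
--         if left == 1:
--             return int(candidate)
--         candidate += 1
--     return 1
-- ===== SOURCE B (Python) =====
-- def _coprime_rotation_step(size: int) -> int:
--     pool_size = max(1, int(size))
--     primes = []
--     n = pool_size
--     f = 2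
--     while f * f <= n:
--         if n % f == 0:
--             primes.append(f)
--             while n % f == 0:
--                 n //= f
--         f += 1
--     if n > 1:
--         primes.append(n)
--     candidate = 2
--     while candidate < pool_size:
--         if all(candidate % p != 0 for p in primes):
--             return candidate
--         candidate += 1
--     return 1
-- ===== Notes on version B (the rewrite author's own statement) =====
-- stated objective: alternative
-- what changed: B first builds the list of prime factors of pool_size by trial division once, then scans candidates testing divisibility against that factor list, instead of A's full Euclidean-gcd computation for every candidate.
import Mathlib
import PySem

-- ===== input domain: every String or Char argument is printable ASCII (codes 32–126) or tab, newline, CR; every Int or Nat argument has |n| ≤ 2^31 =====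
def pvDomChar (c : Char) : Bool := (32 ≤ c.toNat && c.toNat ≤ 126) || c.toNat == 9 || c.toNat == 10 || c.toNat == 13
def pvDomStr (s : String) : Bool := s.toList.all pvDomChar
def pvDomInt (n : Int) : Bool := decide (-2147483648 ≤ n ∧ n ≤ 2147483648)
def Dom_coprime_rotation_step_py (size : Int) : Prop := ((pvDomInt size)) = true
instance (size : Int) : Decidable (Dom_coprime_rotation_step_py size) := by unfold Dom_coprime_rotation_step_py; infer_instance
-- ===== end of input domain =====

-- B replaces A's per-candidate Euclidean gcd test by a one-time trial-division prime
-- factorisation of the pool size followed by a divisibility check of each candidate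
-- against that factor list (objective: alternative algorithm).

-- ===== PORT A =====
-- termination fact for the inner Euclid loop (cited by pvGcd's decreasing_by)
theorem pv_mod_natAbs_lt (l r : Int) (h : r ≠ 0) : (PySem.Int.mod l r).natAbs < r.natAbs := by
  rcases lt_or_gt_of_ne h with hneg | hpos
  · have := PySem.Int.mod_neg_bounds l hneg
    omega
  · have h1 := PySem.Int.mod_nonneg l hpos
    have h2 := PySem.Int.mod_lt l hpos
    omega

-- inner `while right:` loop of A
def pvGcd (left right : Int) : Int :=
  if _h : right ≠ 0 then pvGcd right (PySem.Int.mod left right) else left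
termination_by right.natAbs
decreasing_by exact pv_mod_natAbs_lt left right _h

-- outer `while candidate < pool_size:` loop of A
def pvALoop (pool candidate : Int) : Int :=
  if _h : candidate < pool then
    if pvGcd candidate pool = 1 then candidate
    else pvALoop pool (candidate + 1)
  else 1
termination_by (pool - candidate).toNat
decreasing_by omega

def coprime_rotation_step_py (size : Int) : Int :=
  pvALoop (max 1 size) 2

-- ===== PORT B =====
-- `while n % f == 0: n //= f`  (fuel only makes the def total; the caller passes enough)
def pvStrip : Nat → Int → Int → Int
  | 0, n, _ => n
  | fuel + 1, n, f =>
    if PySem.Int.mod n f = 0 then pvStrip fuel (PySem.Int.floordiv n f) f else n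

-- `while f * f <= n:` trial-division factor loop (fuel only makes the def total)
def pvFactor : Nat → Int → Int → List Int → List Int × Int
  | 0, n, _, primes => (primes, n)
  | fuel + 1, n, f, primes =>
    if f * f ≤ n then
      if PySem.Int.mod n f = 0 then
        pvFactor fuel (pvStrip n.toNat n f) (f + 1) (primes ++ [f])
      else
        pvFactor fuel n (f + 1) primes
    else (primes, n)

-- `while candidate < pool_size:` loop of B with the all(...) divisibility test
def pvBLoop (primes : List Int) (pool candidate : Int) : Int :=
  if _h : candidate < pool then
    if primes.all (fun p => PySem.Int.mod candidate p != 0) then candidate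
    else pvBLoop primes pool (candidate + 1)
  else 1
termination_by (pool - candidate).toNat
decreasing_by omega

def coprime_rotation_step_py_alt (size : Int) : Int :=
  let pool := max 1 size
  let res := pvFactor (pool.toNat + 1) pool 2 []
  let primes := if 1 < res.2 then res.1 ++ [res.2] else res.1
  pvBLoop primes pool 2

-- ===== PRECONDITION & SPEC =====
def Spec_coprime_rotation_step_py (size : Int) (out : Int) : Prop := out = coprime_rotation_step_py_alt size
instance (size : Int) (out : Int) : Decidable (Spec_coprime_rotation_step_py size out) := by unfold Spec_coprime_rotation_step_py; infer_instance

-- ===== CLAIM (what is proved, stated in full; the proofs are below) =====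
def Claim_equal_coprime_rotation_step_py : Prop := ∀ (size : Int), Dom_coprime_rotation_step_py size → Spec_coprime_rotation_step_py size (coprime_rotation_step_py size)

-- ===== LEMMAS AND PROOFS =====

-- A's Euclid loop computes Nat.gcd on nonnegative inputs
theorem pvGcd_eq_natGcd : ∀ (b a : Nat), pvGcd (a : Int) (b : Int) = ((Nat.gcd b a : Nat) : Int) := by
  intro b
  induction b using Nat.strong_induction_on with
  | _ b ih =>
    intro a
    rw [pvGcd]
    rcases Nat.eq_zero_or_pos b with hb | hb
    · subst hb; simp
    · have hbne : (b : Int) ≠ 0 := by omega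
      rw [dif_pos hbne]
      rw [PySem.Int.mod_natCast]
      rw [ih (a % b) (Nat.mod_lt _ hb)]
      rw [Nat.gcd_rec b a]

-- pvStrip removes exactly a power of f
theorem pvStrip_spec : ∀ (fuel : Nat) (n f : Int), 1 ≤ n → 2 ≤ f → n.toNat ≤ fuel →
    ∃ (k : Nat), 1 ≤ pvStrip fuel n f ∧ n = f ^ k * pvStrip fuel n f ∧ ¬ (f ∣ pvStrip fuel n f) := by
  intro fuel
  induction fuel with
  | zero => intro n f hn hf hfuel; omega
  | succ fuel ih =>
    intro n f hn hf hfuel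
    by_cases hmod : PySem.Int.mod n f = 0
    · have hdvd : f ∣ n := (PySem.Int.mod_eq_zero_iff_dvd n f).mp hmod
      have hfpos : (0:Int) < f := by omega
      have hdiv : PySem.Int.floordiv n f = n / f := PySem.Int.floordiv_eq_ediv_of_pos hfpos
      have hmul : n / f * f = n := Int.ediv_mul_cancel hdvd
      have hq1 : 1 ≤ n / f := by nlinarith [hmul]
      have hlt : n / f < n := by nlinarith [hmul]
      have hfl : (n / f).toNat ≤ fuel := by omega
      obtain ⟨k, h1, h2, h3⟩ := ih (n / f) f hq1 hf hfl
      refine ⟨k + 1, ?_, ?_, ?_⟩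
      · simpa [pvStrip, hmod, hdiv] using h1
      · have : n = f ^ (k+1) * pvStrip fuel (n / f) f := by
          rw [pow_succ]
          calc n = n / f * f := hmul.symm
          _ = (f ^ k * pvStrip fuel (n/f) f) * f := by rw [← h2]
          _ = f ^ k * f * pvStrip fuel (n/f) f := by ring
        simpa [pvStrip, hmod, hdiv] using this
      · simpa [pvStrip, hmod, hdiv] using h3
    · refine ⟨0, ?_, ?_, ?_⟩ <;> simp [pvStrip, hmod]
      · omega
      · exact fun hd => hmod ((PySem.Int.mod_eq_zero_iff_dvd n f).mpr hd)

theorem pv_prime_dvd_prime (p q : Int) (hp : Prime p) (hq : Prime q)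
    (hp0 : 0 < p) (hq0 : 0 < q) (h : p ∣ q) : p = q := by
  have hpn : p.natAbs.Prime := Int.prime_iff_natAbs_prime.mp hp
  have hqn : q.natAbs.Prime := Int.prime_iff_natAbs_prime.mp hq
  have hd : p.natAbs ∣ q.natAbs := Int.natAbs_dvd_natAbs.mpr h
  have := (Nat.prime_dvd_prime_iff_eq hpn hqn).mp hd
  omega

-- a divisor with no smaller divisor of n is prime
theorem pv_leastDiv_prime (n f : Int) (hf : 2 ≤ f) (hdvd : f ∣ n)
    (hmin : ∀ d : Int, 2 ≤ d → d < f → ¬ d ∣ n) : Prime f := by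
  rw [Int.prime_iff_natAbs_prime, Nat.prime_def_lt]
  constructor
  · omega
  · intro m hm hmd
    by_contra hne
    have hm2 : 2 ≤ m := by
      rcases Nat.lt_or_ge m 2 with h | h
      · interval_cases m
        · exact absurd (Nat.eq_zero_of_zero_dvd hmd) (by omega)
        · exact absurd rfl hne
      · exact h
    have hmf : (m : Int) ∣ f := by
      have : (m:Int) ∣ (f.natAbs : Int) := Int.natCast_dvd_natCast.mpr hmd
      rwa [Int.natAbs_of_nonneg (by omega)] at this
    exact hmin m (by omega) (by omega) (hmf.trans hdvd)

-- a remainder > 1 with no divisor below f and f*f > n is prime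
theorem pv_tail_prime (n f : Int) (h1 : 1 < n) (hf : 2 ≤ f) (hsq : n < f * f)
    (hmin : ∀ d : Int, 2 ≤ d → d < f → ¬ d ∣ n) : Prime n := by
  by_contra hnp
  have hnn : ¬ n.natAbs.Prime := fun h => hnp (Int.prime_iff_natAbs_prime.mpr h)
  have hpos : 0 < n.natAbs := by omega
  have hsqle : n.natAbs.minFac ^ 2 ≤ n.natAbs := Nat.minFac_sq_le_self hpos hnn
  have hpr : n.natAbs.minFac.Prime := Nat.minFac_prime (by omega)
  have h2 : 2 ≤ n.natAbs.minFac := hpr.two_le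
  have hdvd : (n.natAbs.minFac : Int) ∣ n := by
    have : (n.natAbs.minFac : Int) ∣ (n.natAbs : Int) := Int.natCast_dvd_natCast.mpr (Nat.minFac_dvd _)
    rwa [Int.natAbs_of_nonneg (by omega)] at this
  have hlt : (n.natAbs.minFac : Int) < f := by
    by_contra hge
    push Not at hge
    have : f * f ≤ (n.natAbs.minFac : Int) * n.natAbs.minFac := by nlinarith
    have h3 : (n.natAbs.minFac : Int) * n.natAbs.minFac ≤ n := by
      have := hsqle
      have hn : ((n.natAbs : Nat) : Int) = n := Int.natAbs_of_nonneg (by omega)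
      push_cast [pow_two] at this ⊢
      omega
    omega
  exact hmin _ (by exact_mod_cast h2) hlt hdvd

-- base-case payload: when the trial loop stops, the remainder is 1 or prime
theorem pvFactor_base (n f : Int) (hn : 1 ≤ n) (hf : 2 ≤ f) (hsq : n < f * f)
    (hmin : ∀ d : Int, 2 ≤ d → d < f → ¬ d ∣ n) :
    (1 < n → Prime n) ∧ (∀ p : Int, Prime p → 0 < p → p ∣ n → p = n) := by
  by_cases h1 : 1 < n
  · have hpr := pv_tail_prime n f h1 hf hsq hmin
    exact ⟨fun _ => hpr, fun p hp hp0 hpd => pv_prime_dvd_prime p n hp hpr hp0 (by omega) hpd⟩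
  · have hn1 : n = 1 := by omega
    subst hn1
    refine ⟨by omega, fun p hp hp0 hpd => ?_⟩
    exact absurd (isUnit_of_dvd_one hpd) hp.not_unit

-- the factor loop: soundness and completeness of the collected list
theorem pvFactor_spec : ∀ (fuel : Nat) (n f : Int) (acc : List Int),
    1 ≤ n → 2 ≤ f → (∀ d : Int, 2 ≤ d → d < f → ¬ d ∣ n) → (n + 2 - f).toNat ≤ fuel →
    ∃ L m, pvFactor fuel n f acc = (acc ++ L, m) ∧ 1 ≤ m ∧ m ∣ n ∧
      (1 < m → Prime m) ∧
      (∀ q ∈ L, Prime q ∧ 2 ≤ q ∧ q ∣ n) ∧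
      (∀ p : Int, Prime p → 0 < p → p ∣ n → p ∈ L ∨ p = m) := by
  intro fuel
  induction fuel with
  | zero =>
    intro n f acc hn hf hmin hfuel
    have hfn : n + 2 ≤ f := by omega
    have hsq : n < f * f := by nlinarith
    obtain ⟨hp1, hp2⟩ := pvFactor_base n f hn hf hsq hmin
    exact ⟨[], n, by simp [pvFactor], hn, dvd_refl n, hp1,
      by simp, fun p hp hp0 hpd => Or.inr (hp2 p hp hp0 hpd)⟩
  | succ fuel ih =>
    intro n f acc hn hf hmin hfuel
    by_cases hguard : f * f ≤ n
    · have hfn : f ≤ n := by nlinarith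
      by_cases hmod : PySem.Int.mod n f = 0
      · have hdvd : f ∣ n := (PySem.Int.mod_eq_zero_iff_dvd n f).mp hmod
        obtain ⟨k, hs1, hs2, hs3⟩ := pvStrip_spec n.toNat n f hn hf le_rfl
        set n' := pvStrip n.toNat n f with hn'
        have hn'dvd : n' ∣ n := ⟨f ^ k, by rw [hs2]; ring⟩
        have hn'le : n' ≤ n := Int.le_of_dvd (by omega) hn'dvd
        have hprimef := pv_leastDiv_prime n f hf hdvd hmin
        have hmin' : ∀ d : Int, 2 ≤ d → d < f + 1 → ¬ d ∣ n' := by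
          intro d hd2 hdf hdd
          rcases lt_or_eq_of_le (by omega : d ≤ f) with h | h
          · exact hmin d hd2 h (hdd.trans hn'dvd)
          · exact hs3 (h ▸ hdd)
        obtain ⟨L', m, heq, hm1, hmdvd, hmpr, hLS, hLC⟩ :=
          ih n' (f + 1) (acc ++ [f]) hs1 (by omega) hmin' (by omega)
        refine ⟨f :: L', m, ?_, hm1, hmdvd.trans hn'dvd, hmpr, ?_, ?_⟩
        · rw [pvFactor, if_pos hguard, if_pos hmod, ← hn', heq, List.append_assoc]; rfl
        · intro q hq
          rcases List.mem_cons.mp hq with h | h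
          · exact ⟨h ▸ hprimef, by omega, h ▸ hdvd⟩
          · obtain ⟨h1, h2, h3⟩ := hLS q h
            exact ⟨h1, h2, h3.trans hn'dvd⟩
        · intro p hp hp0 hpd
          rw [hs2] at hpd
          rcases (hp.dvd_mul).mp hpd with h | h
          · have hpf : p ∣ f := hp.dvd_of_dvd_pow h
            have hpf' : p = f := pv_prime_dvd_prime p f hp hprimef hp0 (by omega) hpf
            exact Or.inl (hpf' ▸ List.mem_cons_self)
          · rcases hLC p hp hp0 h with h' | h'
            · exact Or.inl (List.mem_cons_of_mem _ h')
            · exact Or.inr h'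
      · have hnd : ¬ f ∣ n := fun h => hmod ((PySem.Int.mod_eq_zero_iff_dvd n f).mpr h)
        have hmin' : ∀ d : Int, 2 ≤ d → d < f + 1 → ¬ d ∣ n := by
          intro d hd2 hdf hdd
          rcases lt_or_eq_of_le (by omega : d ≤ f) with h | h
          · exact hmin d hd2 h hdd
          · exact hnd (h ▸ hdd)
        obtain ⟨L', m, heq, rest⟩ := ih n (f + 1) acc hn (by omega) hmin' (by omega)
        exact ⟨L', m, by rw [pvFactor, if_pos hguard, if_neg hmod]; exact heq, rest⟩
    · have hsq : n < f * f := by omega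
      obtain ⟨hp1, hp2⟩ := pvFactor_base n f hn hf hsq hmin
      exact ⟨[], n, by simp [pvFactor, hguard], hn, dvd_refl n, hp1,
        by simp, fun p hp hp0 hpd => Or.inr (hp2 p hp hp0 hpd)⟩

-- the two per-candidate tests agree
theorem pv_test_iff (pool c : Int) (primes : List Int) (hpool : 1 ≤ pool) (hc : 2 ≤ c)
    (hS : ∀ q ∈ primes, Prime q ∧ 0 < q ∧ q ∣ pool)
    (hC : ∀ p : Int, Prime p → 0 < p → p ∣ pool → p ∈ primes) :
    (pvGcd c pool = 1 ↔ (primes.all (fun p => PySem.Int.mod c p != 0)) = true) := by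
  have hcast : pvGcd c pool = ((Nat.gcd pool.natAbs c.natAbs : Nat) : Int) := by
    have h1 : ((c.natAbs : Nat) : Int) = c := Int.natAbs_of_nonneg (by omega)
    have h2 : ((pool.natAbs : Nat) : Int) = pool := Int.natAbs_of_nonneg (by omega)
    rw [← h1, ← h2, pvGcd_eq_natGcd]; simp [Int.natAbs_abs]
  rw [hcast, List.all_eq_true]
  have hmem : ∀ q ∈ primes, ((PySem.Int.mod c q != 0) = true ↔ ¬ q ∣ c) := by
    intro q _
    rw [bne_iff_ne, ne_eq, PySem.Int.mod_eq_zero_iff_dvd]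
  constructor
  · intro hg q hq
    rw [hmem q hq]
    intro hqc
    obtain ⟨hqp, hq0, hqpool⟩ := hS q hq
    have hd : q.natAbs ∣ Nat.gcd pool.natAbs c.natAbs :=
      Nat.dvd_gcd (Int.natAbs_dvd_natAbs.mpr hqpool) (Int.natAbs_dvd_natAbs.mpr hqc)
    have hg1 : Nat.gcd pool.natAbs c.natAbs = 1 := by omega
    rw [hg1] at hd
    have hq1 : q.natAbs = 1 := Nat.dvd_one.mp hd
    have : q = 1 := by omega
    exact hqp.not_unit (this ▸ isUnit_one)
  · intro hall
    by_contra hg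
    have hgne : Nat.gcd pool.natAbs c.natAbs ≠ 1 := by omega
    have hgpos : 0 < Nat.gcd pool.natAbs c.natAbs := Nat.gcd_pos_of_pos_left _ (by omega)
    set g := Nat.gcd pool.natAbs c.natAbs with hgdef
    have hppr : g.minFac.Prime := Nat.minFac_prime hgne
    have hpd : g.minFac ∣ g := Nat.minFac_dvd g
    have hdp : (g.minFac : Int) ∣ pool := by
      have : (g.minFac : Int) ∣ (pool.natAbs : Int) :=
        Int.natCast_dvd_natCast.mpr (hpd.trans (Nat.gcd_dvd_left _ _))
      rwa [Int.natAbs_of_nonneg (by omega)] at this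
    have hdc : (g.minFac : Int) ∣ c := by
      have : (g.minFac : Int) ∣ (c.natAbs : Int) :=
        Int.natCast_dvd_natCast.mpr (hpd.trans (Nat.gcd_dvd_right _ _))
      rwa [Int.natAbs_of_nonneg (by omega)] at this
    have hip : Prime ((g.minFac : Nat) : Int) := by
      rw [Int.prime_iff_natAbs_prime, Int.natAbs_natCast]
      exact hppr
    have hmem' := hC _ hip (by exact_mod_cast hppr.pos) hdp
    exact (hmem _ hmem').mp (hall _ hmem') hdc

-- the two scans agree when their tests agree
theorem pv_loop_eq (primes : List Int) (pool : Int)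
    (htest : ∀ c : Int, 2 ≤ c → c < pool →
      (pvGcd c pool = 1 ↔ (primes.all (fun p => PySem.Int.mod c p != 0)) = true)) :
    ∀ (k : Nat) (c : Int), (pool - c).toNat ≤ k → 2 ≤ c → pvALoop pool c = pvBLoop primes pool c := by
  intro k
  induction k with
  | zero =>
    intro c hk hc
    have hcp : ¬ c < pool := by omega
    rw [pvALoop, pvBLoop, dif_neg hcp, dif_neg hcp]
  | succ k ih =>
    intro c hk hc
    by_cases hcp : c < pool
    · rw [pvALoop, pvBLoop, dif_pos hcp, dif_pos hcp]
      by_cases ht : pvGcd c pool = 1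
      · rw [if_pos ht, if_pos ((htest c hc hcp).mp ht)]
      · rw [if_neg ht, if_neg (fun hb => ht ((htest c hc hcp).mpr hb))]
        exact ih (c + 1) (by omega) (by omega)
    · rw [pvALoop, pvBLoop, dif_neg hcp, dif_neg hcp]

-- ===== VERDICT (by name: the statement is the Claim_ definition above) =====
theorem coprime_rotation_step_py_spec : Claim_equal_coprime_rotation_step_py := by
  intro size _
  unfold Spec_coprime_rotation_step_py coprime_rotation_step_py coprime_rotation_step_py_alt
  have hp1 : (1:Int) ≤ max 1 size := le_max_left 1 size
  obtain ⟨L, m, heq, hm1, hmdvd, hmpr, hLS, hLC⟩ :=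
    pvFactor_spec ((max 1 size).toNat + 1) (max 1 size) 2 [] hp1 le_rfl (by omega) (by omega)
  show pvALoop (max 1 size) 2 =
    pvBLoop (if 1 < (pvFactor ((max 1 size).toNat + 1) (max 1 size) 2 []).2
             then (pvFactor ((max 1 size).toNat + 1) (max 1 size) 2 []).1 ++
                  [(pvFactor ((max 1 size).toNat + 1) (max 1 size) 2 []).2]
             else (pvFactor ((max 1 size).toNat + 1) (max 1 size) 2 []).1) (max 1 size) 2
  rw [heq]
  simp only [List.nil_append]
  set primesF := if 1 < m then L ++ [m] else L with hprimesF
  have hS : ∀ q ∈ primesF, Prime q ∧ 0 < q ∧ q ∣ max 1 size := by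
    intro q hq
    rw [hprimesF] at hq
    by_cases hm : 1 < m
    · rw [if_pos hm] at hq
      rcases List.mem_append.mp hq with h | h
      · obtain ⟨ha, hb, hc⟩ := hLS q h
        exact ⟨ha, by omega, hc⟩
      · have : q = m := by simpa using h
        subst this
        exact ⟨hmpr hm, by omega, hmdvd⟩
    · rw [if_neg hm] at hq
      obtain ⟨ha, hb, hc⟩ := hLS q hq
      exact ⟨ha, by omega, hc⟩
  have hC : ∀ p : Int, Prime p → 0 < p → p ∣ max 1 size → p ∈ primesF := by
    intro p hp hp0 hpd
    have hp2 : 2 ≤ p := by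
      have := (Int.prime_iff_natAbs_prime.mp hp).two_le
      omega
    rcases hLC p hp hp0 hpd with h | h
    · rw [hprimesF]
      by_cases hm : 1 < m
      · rw [if_pos hm]; exact List.mem_append_left _ h
      · rw [if_neg hm]; exact h
    · have hm : 1 < m := by omega
      rw [hprimesF, if_pos hm]
      exact List.mem_append_right _ (by simp [h])
  exact pv_loop_eq primesF (max 1 size)
    (fun c hc hcp => pv_test_iff (max 1 size) c primesF hp1 hc hS hC)
    ((max 1 size) - 2).toNat 2 le_rfl le_rfl
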